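-- pv_equiv track=rewrite | github.com/futuroptimist/sugarkube | scripts/ssd_post_clone_validate.py | evaluate_boot_order
-- ===== SOURCE A (Python) =====
-- from typing import Dict, Iterable, List, Optional
--
-- class ValidationStatus:
--     """Possible validation result states."""
--
--     PASS = "pass"
--     WARN = "warn"
--     FAIL = "fail"
--     SKIP = "skip"
--
-- def evaluate_boot_order(order: str) -> Dict[str, object]:
--     """Assess whether USB boot precedes SD boot in the EEPROM order."""
--
--     # Raspberry Pi firmware evaluates BOOT_ORDER from the least significant nibble, meaning
--     # the right-most character is attempted first. Reverse the string so index zero aligns with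
--     # the highest priority boot mode before comparing the positions of USB (4/6) vs SD (0/1).
--     digits = list(reversed(order))
--     usb_indices = [i for i, digit in enumerate(digits) if digit in {"4", "6"}]
--     sd_indices = [i for i, digit in enumerate(digits) if digit in {"0", "1"}]
--     if not usb_indices:
--         status = ValidationStatus.WARN
--         detail = "Boot order does not reference USB mass storage (4 or 6)."
--     elif not sd_indices:
--         status = ValidationStatus.PASS
--         detail = "USB mass storage is present and SD is absent in the boot order."
--     else:
--         if min(usb_indices) < min(sd_indices):
--             status = ValidationStatus.PASS
--             detail = "USB mass storage precedes SD card in the boot order."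
--         else:
--             status = ValidationStatus.WARN
--             detail = "SD card precedes USB mass storage; consider reordering."
--     return {
--         "status": status,
--         "order": order,
--         "details": detail,
--     }
-- ===== SOURCE B (Python) =====
-- def evaluate_boot_order(order):
--     """Assess whether USB boot precedes SD boot in the EEPROM order."""
--     if not any(c in "46" for c in order):
--         result = ("warn", "Boot order does not reference USB mass storage (4 or 6).")
--     elif not any(c in "01" for c in order):
--         result = ("pass", "USB mass storage is present and SD is absent in the boot order.")
--     else:
--         # Firmware tries the right-most nibble first: the first decisive digit
--         # seen scanning from the right settles the verdict.
--         for c in reversed(order):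
--             if c in "46":
--                 result = ("pass", "USB mass storage precedes SD card in the boot order.")
--                 break
--             if c in "01":
--                 result = ("warn", "SD card precedes USB mass storage; consider reordering.")
--                 break
--     status, detail = result
--     return {"status": status, "order": order, "details": detail}
-- ===== Notes on version B (the rewrite author's own statement) =====
-- stated objective: simpler
-- what changed: Replaces building two full reversed-index lists and comparing their minima with two presence checks plus a single early-exit right-to-left scan that stops at the first decisive digit.
import Mathlib
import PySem

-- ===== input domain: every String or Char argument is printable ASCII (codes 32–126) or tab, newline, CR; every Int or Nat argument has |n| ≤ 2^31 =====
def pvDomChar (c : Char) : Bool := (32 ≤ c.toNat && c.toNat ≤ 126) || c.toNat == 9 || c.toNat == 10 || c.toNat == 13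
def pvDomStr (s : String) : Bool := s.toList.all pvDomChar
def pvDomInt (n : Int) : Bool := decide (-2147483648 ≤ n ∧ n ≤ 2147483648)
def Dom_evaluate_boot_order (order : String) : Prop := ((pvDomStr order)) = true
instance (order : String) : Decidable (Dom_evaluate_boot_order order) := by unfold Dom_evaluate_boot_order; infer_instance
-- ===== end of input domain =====

-- B replaces A's two reversed-index lists and min comparison by two presence checks and one
-- early-exit right-to-left scan; objective: simpler.

-- ===== PORT A =====
-- helper naming A's list comprehension shape: indices (from enumerate start s) of chars satisfying q
def pvIdxs (q : Char → Bool) (l : List Char) (s : Int) : List Int :=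
  ((PySem.List.enumerate l s).filter (fun p => q p.2)).map Prod.fst

def evaluate_boot_order (order : String) : List (String × String) :=
  let digits := order.toList.reverse
  let usb_indices := pvIdxs (fun c => c == '4' || c == '6') digits 0
  let sd_indices := pvIdxs (fun c => c == '0' || c == '1') digits 0
  let res : String × String :=
    if usb_indices.isEmpty then
      ("warn", "Boot order does not reference USB mass storage (4 or 6).")
    else if sd_indices.isEmpty then
      ("pass", "USB mass storage is present and SD is absent in the boot order.")
    else if (PySem.List.min? usb_indices (fun x => x)).getD 0 <
            (PySem.List.min? sd_indices (fun x => x)).getD 0 then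
      -- .getD 0 only makes the min total; both lists are nonempty in this branch
      ("pass", "USB mass storage precedes SD card in the boot order.")
    else
      ("warn", "SD card precedes USB mass storage; consider reordering.")
  [("status", res.1), ("order", order), ("details", res.2)]

-- ===== PORT B =====
-- the early-exit loop of B; the [] case is unreachable under B's two guards
def pvScan : List Char → String × String
  | [] => ("", "")
  | c :: t =>
    if c == '4' || c == '6' then
      ("pass", "USB mass storage precedes SD card in the boot order.")
    else if c == '0' || c == '1' then
      ("warn", "SD card precedes USB mass storage; consider reordering.")
    else pvScan t

def evaluate_boot_order_alt (order : String) : List (String × String) :=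
  let res : String × String :=
    if !(order.toList.any (fun c => c == '4' || c == '6')) then
      ("warn", "Boot order does not reference USB mass storage (4 or 6).")
    else if !(order.toList.any (fun c => c == '0' || c == '1')) then
      ("pass", "USB mass storage is present and SD is absent in the boot order.")
    else pvScan order.toList.reverse
  [("status", res.1), ("order", order), ("details", res.2)]

-- ===== PRECONDITION & SPEC =====
def Spec_evaluate_boot_order (order : String) (out : List (String × String)) : Prop := out = evaluate_boot_order_alt order
instance (order : String) (out : List (String × String)) : Decidable (Spec_evaluate_boot_order order out) := by unfold Spec_evaluate_boot_order; infer_instance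

-- ===== CLAIM (what is proved, stated in full; the proofs are below) =====
def Claim_equal_evaluate_boot_order : Prop := ∀ (order : String), Dom_evaluate_boot_order order → Spec_evaluate_boot_order order (evaluate_boot_order order)

-- ===== LEMMAS AND PROOFS =====

theorem pvIdxs_nil (q : Char → Bool) (s : Int) : pvIdxs q [] s = [] := rfl

theorem pvIdxs_cons (q : Char → Bool) (c : Char) (l : List Char) (s : Int) :
    pvIdxs q (c :: l) s =
      (if q c then [s] else []) ++ pvIdxs q l (s + 1) := by
  simp [pvIdxs, PySem.List.enumerate_cons, List.filter_cons]
  split_ifs <;> simp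

theorem pvIdxs_eq_nil_iff (q : Char → Bool) (l : List Char) (s : Int) :
    pvIdxs q l s = [] ↔ l.any q = false := by
  induction l generalizing s with
  | nil => simp [pvIdxs_nil]
  | cons c t ih =>
    rw [pvIdxs_cons]
    by_cases h : q c = true <;> simp [h, ih]

theorem pvIdxs_ge (q : Char → Bool) (l : List Char) (s : Int) :
    ∀ x ∈ pvIdxs q l s, s ≤ x := by
  induction l generalizing s with
  | nil => simp [pvIdxs_nil]
  | cons c t ih =>
    intro x hx
    rw [pvIdxs_cons] at hx
    rcases List.mem_append.1 hx with h | h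
    · split_ifs at h <;> simp_all
    · have := ih (s + 1) x h; omega

theorem foldl_min_eq (t : List Int) (a : Int) (h : ∀ x ∈ t, a ≤ x) :
    t.foldl min a = a := by
  induction t generalizing a with
  | nil => rfl
  | cons x t ih =>
    have hx : a ≤ x := h x (by simp)
    simp only [List.foldl_cons, min_eq_left hx]
    exact ih a (fun y hy => h y (by simp [hy]))

theorem min?_pvIdxs_cons_true (q : Char → Bool) (c : Char) (l : List Char) (s : Int)
    (hq : q c = true) :
    PySem.List.min? (pvIdxs q (c :: l) s) (fun x => x) = some s := by
  rw [pvIdxs_cons, hq]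
  simp only [if_true]
  rw [List.singleton_append, PySem.List.min?_id_cons]
  congr 1
  exact foldl_min_eq _ _ (fun x hx => le_trans (by omega) (pvIdxs_ge q l (s + 1) x hx))

-- the decisive comparison agrees with B's early-exit scan whenever both digit kinds occur
theorem cmp_eq_scan (l : List Char) (s : Int)
    (hu : l.any (fun c => c == '4' || c == '6') = true)
    (hs : l.any (fun c => c == '0' || c == '1') = true) :
    (if (PySem.List.min? (pvIdxs (fun c => c == '4' || c == '6') l s) (fun x => x)).getD 0 <
        (PySem.List.min? (pvIdxs (fun c => c == '0' || c == '1') l s) (fun x => x)).getD 0 then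
      (("pass", "USB mass storage precedes SD card in the boot order.") : String × String)
     else
      ("warn", "SD card precedes USB mass storage; consider reordering.")) = pvScan l := by
  induction l generalizing s with
  | nil => simp at hu
  | cons c t ih =>
    by_cases hcu : (c == '4' || c == '6') = true
    · -- head is a USB digit; it cannot be an SD digit
      have hcs : (c == '0' || c == '1') = false := by
        rcases Bool.or_eq_true_iff.1 hcu with h | h <;>
          simp_all [beq_iff_eq]
      have hts : t.any (fun c => c == '0' || c == '1') = true := by
        simp [List.any_cons, hcs] at hs; simpa using hs
      rw [min?_pvIdxs_cons_true (fun c => c == '4' || c == '6') c t s hcu]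
      -- SD min comes from the tail, so it is ≥ s + 1 > s
      have hne : pvIdxs (fun c => c == '0' || c == '1') (c :: t) s ≠ [] := by
        rw [Ne, pvIdxs_eq_nil_iff]; simp [hs]
      obtain ⟨m, hm⟩ := Option.ne_none_iff_exists'.1
        (fun h => hne ((PySem.List.min?_eq_none_iff
          (pvIdxs (fun c => c == '0' || c == '1') (c :: t) s) (fun x => x)).1 h))
      have hmem := PySem.List.min?_mem hm
      rw [pvIdxs_cons, hcs] at hmem
      simp only [Bool.false_eq_true, if_false, List.nil_append] at hmem
      have hge := pvIdxs_ge _ t (s + 1) m hmem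
      rw [hm]
      simp only [Option.getD_some]
      rw [if_pos (by omega)]
      simp [pvScan, hcu]
    · by_cases hcs : (c == '0' || c == '1') = true
      · -- head is an SD digit: SD min is s, USB min ≥ s + 1, comparison is false
        have htu : t.any (fun c => c == '4' || c == '6') = true := by
          simp [List.any_cons, hcu] at hu; simpa using hu
        rw [min?_pvIdxs_cons_true (fun c => c == '0' || c == '1') c t s hcs]
        have hne : pvIdxs (fun c => c == '4' || c == '6') (c :: t) s ≠ [] := by
          rw [Ne, pvIdxs_eq_nil_iff]; simp [hu]
        have hcu' : (c == '4' || c == '6') = false := Bool.eq_false_iff.mpr hcu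
        obtain ⟨m, hm⟩ := Option.ne_none_iff_exists'.1
          (fun h => hne ((PySem.List.min?_eq_none_iff
            (pvIdxs (fun c => c == '4' || c == '6') (c :: t) s) (fun x => x)).1 h))
        have hmem := PySem.List.min?_mem hm
        rw [pvIdxs_cons, hcu'] at hmem
        simp only [Bool.false_eq_true, if_false, List.nil_append] at hmem
        have hge := pvIdxs_ge _ t (s + 1) m hmem
        rw [hm]
        simp only [Option.getD_some]
        rw [if_neg (by omega)]
        simp [pvScan, hcu, hcs]
      · -- head is neither: both index lists drop the head, recurse
        have htu : t.any (fun c => c == '4' || c == '6') = true := by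
          simp [List.any_cons, hcu] at hu; simpa using hu
        have hts : t.any (fun c => c == '0' || c == '1') = true := by
          simp [List.any_cons, hcs] at hs; simpa using hs
        have hcu' : (c == '4' || c == '6') = false := Bool.eq_false_iff.mpr hcu
        have hcs' : (c == '0' || c == '1') = false := Bool.eq_false_iff.mpr hcs
        rw [pvIdxs_cons, pvIdxs_cons, hcu', hcs']
        simp only [Bool.false_eq_true, if_false, List.nil_append]
        rw [ih (s + 1) htu hts]
        simp [pvScan, hcu, hcs]

-- ===== VERDICT (by name: the statement is the Claim_ definition above) =====
theorem evaluate_boot_order_spec : Claim_equal_evaluate_boot_order := by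
  intro order _
  unfold Spec_evaluate_boot_order evaluate_boot_order evaluate_boot_order_alt
  simp only []
  set l := order.toList.reverse with hl
  have hanyU : (order.toList.any (fun c => c == '4' || c == '6')) =
      (l.any (fun c => c == '4' || c == '6')) := by rw [hl, List.any_reverse]
  have hanyS : (order.toList.any (fun c => c == '0' || c == '1')) =
      (l.any (fun c => c == '0' || c == '1')) := by rw [hl, List.any_reverse]
  by_cases hu : l.any (fun c => c == '4' || c == '6') = true
  · by_cases hs : l.any (fun c => c == '0' || c == '1') = true
    · have h1 : (pvIdxs (fun c => c == '4' || c == '6') l 0).isEmpty = false := by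
        rw [List.isEmpty_eq_false_iff, Ne, pvIdxs_eq_nil_iff]; simp [hu]
      have h2 : (pvIdxs (fun c => c == '0' || c == '1') l 0).isEmpty = false := by
        rw [List.isEmpty_eq_false_iff, Ne, pvIdxs_eq_nil_iff]; simp [hs]
      rw [h1, h2]
      simp only [Bool.false_eq_true, if_false, hanyU, hanyS, hu, hs,
        Bool.not_true, if_false]
      rw [cmp_eq_scan l 0 hu hs]
    · have hs' : l.any (fun c => c == '0' || c == '1') = false := by
        cases h : l.any (fun c => c == '0' || c == '1') with
        | false => rfl
        | true => exact absurd h hs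
      have h1 : (pvIdxs (fun c => c == '4' || c == '6') l 0).isEmpty = false := by
        rw [List.isEmpty_eq_false_iff, Ne, pvIdxs_eq_nil_iff]; simp [hu]
      have h2 : (pvIdxs (fun c => c == '0' || c == '1') l 0).isEmpty = true := by
        rw [List.isEmpty_iff, pvIdxs_eq_nil_iff]; exact hs'
      rw [h1, h2]
      simp [hanyU, hanyS, hu, hs']
  · have hu' : l.any (fun c => c == '4' || c == '6') = false := by
      cases h : l.any (fun c => c == '4' || c == '6') with
      | false => rfl
      | true => exact absurd h hu
    have h1 : (pvIdxs (fun c => c == '4' || c == '6') l 0).isEmpty = true := by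
      rw [List.isEmpty_iff, pvIdxs_eq_nil_iff]; exact hu'
    rw [h1]
    simp [hanyU, hu']
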